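-- pv_equiv track=rewrite | github.com/cxygiao/Transmission-Cost-Optimization-Dynamic-Look-Ahead | Utils/readreals.py | decompose_mct
-- ===== SOURCE A (Python) =====
-- def decompose_mct(gate,gate_list=None):
--     if gate_list is None:
--         gate_list = []
--     if len(gate) <= 2:
--         gate_list.append(gate)
--     if len(gate) > 2:
--         gate_list.append([gate[-2], gate[-1]])
--         decompose_mct(gate[0:-1],gate_list)
--         gate_list.append([gate[-2], gate[-1]])
--         decompose_mct(gate[0:-1],gate_list)
--         v_gate = gate[0:-2]
--         v_gate.append(gate[-1])
--         decompose_mct(v_gate,gate_list)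
--
--     return gate_list
-- ===== SOURCE B (Python) =====
-- def decompose_mct(gate, gate_list=None):
--     # Iterative version: explicit work stack instead of recursion.
--     out = [] if gate_list is None else gate_list
--     stack = [("p", gate)]
--     while stack:
--         tag, g = stack.pop()
--         if tag == "e":
--             out.append(g)
--         elif len(g) <= 2:
--             out.append(g)
--         else:
--             pair = [g[-2], g[-1]]
--             rest = g[:-1]
--             v = g[:-2] + [g[-1]]
--             # push in reverse of execution order
--             stack.extend([("p", v), ("p", rest), ("e", pair), ("p", rest), ("e", pair)])
--     return out
-- ===== Notes on version B (the rewrite author's own statement) =====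
-- stated objective: alternative
-- what changed: Replaced the triple-recursive decomposition with an iterative loop over an explicit work stack of process/emit tasks pushed in reverse execution order.
import Mathlib
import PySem

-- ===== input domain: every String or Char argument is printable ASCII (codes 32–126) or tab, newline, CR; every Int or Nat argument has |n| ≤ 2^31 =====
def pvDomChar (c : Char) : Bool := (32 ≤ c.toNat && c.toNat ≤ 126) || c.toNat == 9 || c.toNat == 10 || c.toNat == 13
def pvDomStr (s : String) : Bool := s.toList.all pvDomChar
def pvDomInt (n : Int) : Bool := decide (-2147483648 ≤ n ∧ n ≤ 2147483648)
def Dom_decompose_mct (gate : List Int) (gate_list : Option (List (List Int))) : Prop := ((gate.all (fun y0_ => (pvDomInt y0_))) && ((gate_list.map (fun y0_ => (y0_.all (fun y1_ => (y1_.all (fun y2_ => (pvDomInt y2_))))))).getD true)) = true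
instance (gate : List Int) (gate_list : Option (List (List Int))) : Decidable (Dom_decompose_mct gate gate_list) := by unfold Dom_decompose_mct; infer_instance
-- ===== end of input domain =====

-- B replaces A's triple recursion with an iterative loop over an explicit work stack (alternative decomposition, same cost).
-- A mutates the passed gate_list in place; B performs the same mutation; the equivalence proved here is about the return value.

-- ===== PORT A =====
-- recursion on gate, threading the accumulating list exactly as Python does;
-- pyGet? …|>.getD 0 is exact here: the indices -1/-2 are in range whenever the branch is taken
def decompose_mct_go (gate : List Int) (acc : List (List Int)) : List (List Int) :=
  if gate.length ≤ 2 then acc ++ [gate]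
  else
    let pair := [(PySem.List.pyGet? gate (-2)).getD 0, (PySem.List.pyGet? gate (-1)).getD 0]
    let acc1 := acc ++ [pair]
    let acc2 := decompose_mct_go (PySem.List.slice gate (some 0) (some (-1))) acc1
    let acc3 := acc2 ++ [pair]
    let acc4 := decompose_mct_go (PySem.List.slice gate (some 0) (some (-1))) acc3
    let v_gate := PySem.List.slice gate (some 0) (some (-2)) ++ [(PySem.List.pyGet? gate (-1)).getD 0]
    decompose_mct_go v_gate acc4
termination_by gate.length
decreasing_by
  · simp only [PySem.List.slice_zero_start, PySem.List.slice_to_neg_one, List.length_dropLast]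
    omega
  · simp only [PySem.List.slice_zero_start, PySem.List.slice_to_neg_one, List.length_dropLast]
    omega
  · rw [PySem.List.slice_zero_start, PySem.List.slice_to_neg_ofNat gate 2 (by omega)]
    simp only [List.length_append, List.length_take, List.length_cons, List.length_nil]
    omega

def decompose_mct (gate : List Int) (gate_list : Option (List (List Int))) : List (List Int) :=
  decompose_mct_go gate (gate_list.getD [])

-- ===== PORT B =====
inductive PvTask where
  | process : List Int → PvTask
  | emit : List Int → PvTask
deriving Repr, DecidableEq

def pvWeight : PvTask → Nat
  | PvTask.process g => 4 ^ g.length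
  | PvTask.emit _ => 1

-- the while loop: pop the top of the stack (head of the list), push sub-tasks in reverse execution order
def decompose_mct_altLoop (stack : List PvTask) (out : List (List Int)) : List (List Int) :=
  match stack with
  | [] => out
  | PvTask.emit p :: rest => decompose_mct_altLoop rest (out ++ [p])
  | PvTask.process g :: rest =>
    if g.length ≤ 2 then decompose_mct_altLoop rest (out ++ [g])
    else
      let pair := [(PySem.List.pyGet? g (-2)).getD 0, (PySem.List.pyGet? g (-1)).getD 0]
      let r := PySem.List.slice g (some 0) (some (-1))
      let v := PySem.List.slice g (some 0) (some (-2)) ++ [(PySem.List.pyGet? g (-1)).getD 0]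
      decompose_mct_altLoop
        (PvTask.emit pair :: PvTask.process r :: PvTask.emit pair :: PvTask.process r ::
          PvTask.process v :: rest) out
termination_by (stack.map pvWeight).sum
decreasing_by
  · simp [pvWeight]
  · simp only [List.map_cons, List.sum_cons, pvWeight]
    have h1 : 0 < 4 ^ g.length := pow_pos (by norm_num : (0:ℕ) < 4) _
    omega
  · simp only [List.map_cons, List.sum_cons, pvWeight,
      PySem.List.slice_zero_start, PySem.List.slice_to_neg_one, List.length_dropLast]
    rw [PySem.List.slice_to_neg_ofNat g 2 (by omega)]
    simp only [List.length_append, List.length_take, List.length_cons, List.length_nil]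
    have hb : 4 ≤ 4 ^ (g.length - 2) := by
      calc 4 = 4 ^ 1 := by norm_num
        _ ≤ 4 ^ (g.length - 2) := Nat.pow_le_pow_right (by norm_num) (by omega)
    have e1 : 4 ^ (g.length - 1) = 4 ^ (g.length - 2) * 4 := by
      rw [← pow_succ]; congr 1; omega
    have e2 : 4 ^ g.length = 4 ^ (g.length - 2) * 4 * 4 := by
      rw [← pow_succ, ← pow_succ]; congr 1; omega
    have hm : min (g.length - 2) g.length + 1 = g.length - 1 := by omega
    rw [hm, e1, e2]
    omega

def decompose_mct_alt (gate : List Int) (gate_list : Option (List (List Int))) : List (List Int) :=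
  decompose_mct_altLoop [PvTask.process gate] (gate_list.getD [])

-- ===== PRECONDITION & SPEC =====
def Spec_decompose_mct (gate : List Int) (gate_list : Option (List (List Int))) (out : List (List Int)) : Prop := out = decompose_mct_alt gate gate_list
instance (gate : List Int) (gate_list : Option (List (List Int))) (out : List (List Int)) : Decidable (Spec_decompose_mct gate gate_list out) := by unfold Spec_decompose_mct; infer_instance

-- ===== CLAIM (what is proved, stated in full; the proofs are below) =====
def Claim_equal_decompose_mct : Prop := ∀ (gate : List Int) (gate_list : Option (List (List Int))), Dom_decompose_mct gate gate_list → Spec_decompose_mct gate gate_list (decompose_mct gate gate_list)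

-- ===== LEMMAS AND PROOFS =====

-- processing the top task behaves like one recursive call of A
theorem altLoop_process (n : Nat) :
    ∀ (g : List Int) (rest : List PvTask) (out : List (List Int)), g.length ≤ n →
      decompose_mct_altLoop (PvTask.process g :: rest) out
        = decompose_mct_altLoop rest (decompose_mct_go g out) := by
  induction n with
  | zero =>
    intro g rest out hg
    rw [decompose_mct_altLoop, decompose_mct_go]
    simp only [if_pos (by omega : g.length ≤ 2)]
  | succ n ih =>
    intro g rest out hg
    by_cases h2 : g.length ≤ 2
    · rw [decompose_mct_altLoop, decompose_mct_go]
      simp only [if_pos h2]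
    · have hr : (PySem.List.slice g (some 0) (some (-1))).length ≤ n := by
        simp only [PySem.List.slice_zero_start, PySem.List.slice_to_neg_one, List.length_dropLast]
        omega
      have hv : (PySem.List.slice g (some 0) (some (-2))
          ++ [(PySem.List.pyGet? g (-1)).getD 0]).length ≤ n := by
        rw [PySem.List.slice_zero_start, PySem.List.slice_to_neg_ofNat g 2 (by omega)]
        simp only [List.length_append, List.length_take, List.length_cons, List.length_nil]
        omega
      rw [decompose_mct_altLoop]
      simp only [if_neg h2]
      rw [decompose_mct_altLoop, ih _ _ _ hr, decompose_mct_altLoop, ih _ _ _ hr, ih _ _ _ hv]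
      conv_rhs => rw [decompose_mct_go]
      simp only [if_neg h2]

-- ===== VERDICT (by name: the statement is the Claim_ definition above) =====
theorem decompose_mct_spec : Claim_equal_decompose_mct := by
  intro gate gate_list _
  show decompose_mct gate gate_list = decompose_mct_alt gate gate_list
  unfold decompose_mct decompose_mct_alt
  rw [altLoop_process gate.length gate [] _ le_rfl, decompose_mct_altLoop]
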